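-- pv_equiv track=rewrite | github.com/lzx071021/leetcode_sol | intermediate/arrays_and_strings/334_increasing_triplet_subsequence.py | find_minimal_with_idx
-- ===== SOURCE A (Python) =====
-- from typing import List, Tuple
--
-- def find_minimal_with_idx(nums: List[int], base: int) -> Tuple[int, int]:
--     minimal = None
--     idx_of_min = 0
--     for idx, num in enumerate(nums):
--         if num < base:
--             minimal = num
--             idx_of_min = idx
--     return minimal, idx_of_min
-- ===== SOURCE B (Python) =====
-- from typing import List, Tuple
--
-- def find_minimal_with_idx(nums: List[int], base: int) -> Tuple[int, int]:
--     i = len(nums) - 1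
--     while i >= 0:
--         if nums[i] < base:
--             return nums[i], i
--         i -= 1
--     return None, 0
-- ===== Notes on version B (the rewrite author's own statement) =====
-- stated objective: alternative
-- what changed: Replaces A's forward enumerate pass that keeps overwriting a running (minimal, idx) pair with an index-based while loop that walks from the last index down and returns on the first element below base (the last qualifying one in forward order).
import Mathlib
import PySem

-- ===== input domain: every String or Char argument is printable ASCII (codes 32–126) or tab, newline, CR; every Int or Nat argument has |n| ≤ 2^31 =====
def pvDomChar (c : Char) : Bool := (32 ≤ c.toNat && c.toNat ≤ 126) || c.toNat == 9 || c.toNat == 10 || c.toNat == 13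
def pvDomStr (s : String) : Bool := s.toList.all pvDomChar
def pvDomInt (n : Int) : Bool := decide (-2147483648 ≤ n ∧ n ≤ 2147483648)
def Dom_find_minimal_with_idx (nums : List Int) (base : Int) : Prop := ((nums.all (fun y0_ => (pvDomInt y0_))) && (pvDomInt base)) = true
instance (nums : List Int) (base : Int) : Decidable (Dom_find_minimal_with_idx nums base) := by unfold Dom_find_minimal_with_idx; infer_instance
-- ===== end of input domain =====

-- B replaces A's forward enumerate pass (overwriting a running result) with an index-countdown while loop that returns on the first element below base (objective: alternative; same cost).


-- ===== PORT A =====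
-- forward pass; loop state (minimal, idx_of_min) overwritten at every element below base
def pvGoA (base : Int) (l : List (Int × Int)) (st : Option Int × Int) : Option Int × Int :=
  match l with
  | [] => st
  | (idx, num) :: t => pvGoA base t (if num < base then (some num, idx) else st)

def find_minimal_with_idx (nums : List Int) (base : Int) : Option Int × Int :=
  pvGoA base (PySem.List.enumerate nums 0) (none, 0)

-- ===== PORT B =====
-- the while loop 'i = len(nums)-1; while i >= 0: …; i -= 1', as structural recursion on
-- the number of remaining indices (state k+1 means current index i = k; k = 0 means i < 0).
-- nums[i] is always in range here (0 ≤ i < len), so pyGetD's default is unreachable.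
def pvCountdown (nums : List Int) (base : Int) : Nat → Option Int × Int
  | 0 => (none, 0)
  | k + 1 =>
    let v := PySem.List.pyGetD nums (k : Int) 0
    if v < base then (some v, (k : Int)) else pvCountdown nums base k

def find_minimal_with_idx_alt (nums : List Int) (base : Int) : Option Int × Int :=
  pvCountdown nums base nums.length

-- ===== PRECONDITION & SPEC =====
def Spec_find_minimal_with_idx (nums : List Int) (base : Int) (out : Option Int × Int) : Prop := out = find_minimal_with_idx_alt nums base
instance (nums : List Int) (base : Int) (out : Option Int × Int) : Decidable (Spec_find_minimal_with_idx nums base out) := by unfold Spec_find_minimal_with_idx; infer_instance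

-- ===== CLAIM (what is proved, stated in full; the proofs are below) =====
def Claim_equal_find_minimal_with_idx : Prop := ∀ (nums : List Int) (base : Int), Dom_find_minimal_with_idx nums base → Spec_find_minimal_with_idx nums base (find_minimal_with_idx nums base)

-- ===== LEMMAS AND PROOFS =====
theorem pvGoA_append (base : Int) (l₁ l₂ : List (Int × Int)) (st : Option Int × Int) :
    pvGoA base (l₁ ++ l₂) st = pvGoA base l₂ (pvGoA base l₁ st) := by
  induction l₁ generalizing st with
  | nil => rfl
  | cons p t ih => obtain ⟨i, n⟩ := p; simp [pvGoA, ih]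

theorem pvCountdown_prefix (nums : List Int) (x base : Int) :
    ∀ k, k ≤ nums.length → pvCountdown (nums ++ [x]) base k = pvCountdown nums base k := by
  intro k
  induction k with
  | zero => intro _; rfl
  | succ k ih =>
    intro hk
    have hlt : k < nums.length := hk
    have hget : PySem.List.pyGetD (nums ++ [x]) (k : Int) 0 = PySem.List.pyGetD nums (k : Int) 0 := by
      simp [PySem.List.pyGetD_natCast, List.getD, List.getElem?_append_left hlt]
    simp only [pvCountdown, hget, ih (Nat.le_of_lt hlt)]

theorem pvGoA_eq_countdown (base : Int) (nums : List Int) :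
    pvGoA base (PySem.List.enumerate nums 0) (none, 0) = pvCountdown nums base nums.length := by
  induction nums using List.reverseRecOn with
  | nil => rfl
  | append_singleton nums x ih =>
    rw [PySem.List.enumerate_append, pvGoA_append, ih]
    have hget : PySem.List.pyGetD (nums ++ [x]) ((nums.length : Nat) : Int) 0 = x := by
      simp [PySem.List.pyGetD_natCast, List.getD]
    simp only [List.length_append, List.length_singleton]
    show pvGoA base (PySem.List.enumerate [x] (0 + nums.length)) (pvCountdown nums base nums.length)
        = pvCountdown (nums ++ [x]) base (nums.length + 1)
    simp only [PySem.List.enumerate_cons, PySem.List.enumerate_nil, pvGoA, pvCountdown, hget,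
      zero_add, pvCountdown_prefix nums x base nums.length (le_refl _)]

-- ===== VERDICT (by name: the statement is the Claim_ definition above) =====
theorem find_minimal_with_idx_spec : Claim_equal_find_minimal_with_idx := by
  intro nums base _
  unfold Spec_find_minimal_with_idx find_minimal_with_idx find_minimal_with_idx_alt
  exact pvGoA_eq_countdown base nums
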